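-- pv_equiv track=rewrite | github.com/JC-2020/python101 | has_same_digit_frequency.py | has_same_digit_frequency
-- ===== SOURCE A (Python) =====
-- def has_same_digit_frequency(a, b):
--     if len(a) != len(b):
--       return False
--     result = {}
--     for number in a:
--       if number in result.keys():
--         result[number] += 1
--       else:
--         result[number] = 1
--     for number in b:
--       try:
--         if result[number] == 0:
--           return False
--         else:
--           result[number] -= 1
--       except KeyError:
--         return False
--     return True
-- ===== SOURCE B (Python) =====
-- def has_same_digit_frequency(a, b):
--     ca = {}
--     for x in a:
--         ca[x] = ca.get(x, 0) + 1
--     cb = {}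
--     for x in b:
--         cb[x] = cb.get(x, 0) + 1
--     return ca == cb
-- ===== Notes on version B (the rewrite author's own statement) =====
-- stated objective: idiomatic
-- what changed: B builds one frequency table per argument and compares the two tables, instead of A's count-then-decrement single table with early exits and a separate length guard (equal tables already imply equal length).
import Mathlib
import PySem

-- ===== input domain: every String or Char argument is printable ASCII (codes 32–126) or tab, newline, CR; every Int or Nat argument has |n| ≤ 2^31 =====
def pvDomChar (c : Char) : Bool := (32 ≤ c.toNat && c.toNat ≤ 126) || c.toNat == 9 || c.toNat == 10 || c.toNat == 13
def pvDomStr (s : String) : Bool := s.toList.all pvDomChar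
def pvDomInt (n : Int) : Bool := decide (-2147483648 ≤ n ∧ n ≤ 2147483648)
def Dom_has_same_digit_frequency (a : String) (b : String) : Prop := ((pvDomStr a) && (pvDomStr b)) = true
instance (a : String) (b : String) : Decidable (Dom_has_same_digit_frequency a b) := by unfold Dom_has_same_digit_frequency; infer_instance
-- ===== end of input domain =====

-- B replaces A's count-then-decrement single table (with its early exits and length guard)
-- by two frequency tables compared for equality; same behaviour, more idiomatic.

-- ===== PORT A =====
-- A's second loop: each char of b must find a nonzero count, which is decremented; early returns.
def pvGoB (d : PySem.Dict Char Int) : List Char → Bool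
  | [] => true
  | c :: rest =>
    match d.get? c with
    | none => false                                  -- KeyError branch → return False
    | some v => if v == 0 then false else pvGoB (d.insert c (v - 1)) rest

def has_same_digit_frequency (a : String) (b : String) : Bool :=
  if a.toList.length ≠ b.toList.length then false
  else
    pvGoB
      (a.toList.foldl
        (fun d c => if d.contains c then d.insert c (d.getD c 0 + 1) else d.insert c 1)
        PySem.Dict.empty)
      b.toList

-- ===== PORT B =====
-- {} built with get(x, 0) + 1
def pvCounterB (cs : List Char) : PySem.Dict Char Int :=
  cs.foldl (fun d x => d.insert x (d.getD x 0 + 1)) PySem.Dict.empty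

-- Python dict ==: same key set and same value at every key (order-insensitive)
def has_same_digit_frequency_alt (a : String) (b : String) : Bool :=
  let ca := pvCounterB a.toList
  let cb := pvCounterB b.toList
  PySem.Set.equal ca.keys cb.keys && ca.keys.all (fun k => ca.get? k == cb.get? k)

-- ===== PRECONDITION & SPEC =====
def Spec_has_same_digit_frequency (a : String) (b : String) (out : Bool) : Prop := out = has_same_digit_frequency_alt a b
instance (a : String) (b : String) (out : Bool) : Decidable (Spec_has_same_digit_frequency a b out) := by unfold Spec_has_same_digit_frequency; infer_instance

-- ===== CLAIM (what is proved, stated in full; the proofs are below) =====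
def Claim_equal_has_same_digit_frequency : Prop := ∀ (a : String) (b : String), Dom_has_same_digit_frequency a b → Spec_has_same_digit_frequency a b (has_same_digit_frequency a b)

-- ===== LEMMAS AND PROOFS =====

-- A's first loop (with the contains branch) builds exactly Counter(a)
lemma pvFoldA_eq_counter (la : List Char) :
    la.foldl (fun d c => if d.contains c then d.insert c (d.getD c 0 + 1) else d.insert c 1)
      PySem.Dict.empty = PySem.Dict.counter la := by
  rw [PySem.List.foldl_congr_mem la _ (fun d x => d.insert x (d.getD x 0 + 1)) _ ?_,
      PySem.Dict.foldl_insert_getD_add_one_eq_counter]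
  intro d x _
  by_cases h : d.contains x = true
  · simp [h]
  · simp only [Bool.not_eq_true] at h
    simp [h, PySem.Dict.getD_of_not_contains d 0 h]

lemma pvGet?_counter (xs : List Char) (c : Char) :
    (PySem.Dict.counter xs).get? c = if c ∈ xs then some ((xs.count c : Int)) else none := by
  by_cases h : c ∈ xs
  · have hc : (PySem.Dict.counter xs).contains c = true := by
      rw [PySem.Dict.contains_counter]; exact List.contains_iff_mem.mpr h
    rw [PySem.Dict.contains_eq_isSome_get?] at hc
    obtain ⟨v, hv⟩ := Option.isSome_iff_exists.mp hc
    have hcount := PySem.Dict.getD_counter xs c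
    rw [PySem.Dict.getD_eq_get?_getD, hv] at hcount
    have hv' : v = (xs.count c : Int) := by simpa using hcount
    rw [hv, if_pos h, hv']
  · have hc : (PySem.Dict.counter xs).contains c = false := by
      rw [PySem.Dict.contains_counter]
      simpa using h
    rw [PySem.Dict.contains_eq_isSome_get?] at hc
    simp only [Option.isSome_eq_false_iff, Option.isNone_iff_eq_none] at hc
    simp [h, hc]

-- the decrement loop succeeds iff every char of l has enough capacity in d
lemma pvGoB_spec (l : List Char) : ∀ d : PySem.Dict Char Int,
    (∀ c, 0 ≤ (d.get? c).getD 0) →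
    pvGoB d l = decide (∀ c ∈ l, ((l.count c : Int)) ≤ (d.get? c).getD 0) := by
  induction l with
  | nil => intro d _; simp [pvGoB]
  | cons c rest ih =>
    intro d hnn
    unfold pvGoB
    rcases hget : d.get? c with _ | v
    · have hcontra : ¬ (((c :: rest).count c : Int) ≤ ((d.get? c).getD 0)) := by
        rw [hget]
        simp only [Option.getD_none, List.count_cons_self]
        push_cast
        omega
      symm
      rw [decide_eq_false_iff_not]
      intro hall
      exact hcontra (hall c (by simp))
    · have hv0 : 0 ≤ v := by have := hnn c; rwa [hget] at this
      by_cases hz : v = 0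
      · subst hz
        have hcontra : ¬ (((c :: rest).count c : Int) ≤ ((d.get? c).getD 0)) := by
          rw [hget]
          simp only [Option.getD_some, List.count_cons_self]
          push_cast
          omega
        simp only [beq_self_eq_true, if_true]
        symm
        rw [decide_eq_false_iff_not]
        intro hall
        exact hcontra (hall c (by simp))
      · have hne : (v == (0:Int)) = false := by simpa using hz
        simp only [hne, Bool.false_eq_true, if_false]
        rw [ih (d.insert c (v - 1)) ?_]
        · simp only [decide_eq_decide]
          rw [iff_comm]
          constructor
          · intro h x hx
            by_cases hxc : x = c
            · subst hxc
              have := h x (by simp)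
              rw [hget] at this
              rw [PySem.Dict.get?_insert_self]
              simp only [List.count_cons_self, Option.getD_some] at this ⊢
              push_cast at this ⊢
              omega
            · have := h x (by simp [hx])
              rw [PySem.Dict.get?_insert_of_ne _ _ hxc]
              rwa [List.count_cons_of_ne (Ne.symm hxc)] at this
          · intro h x hx
            rcases List.mem_cons.mp hx with hxc | hxr
            · subst hxc
              by_cases hm : x ∈ rest
              · have := h x hm
                rw [PySem.Dict.get?_insert_self] at this
                rw [hget]
                simp only [List.count_cons_self, Option.getD_some] at this ⊢
                push_cast at this ⊢
                omega
              · rw [hget]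
                simp only [List.count_cons_self, List.count_eq_zero_of_not_mem hm,
                  Option.getD_some]
                push_cast
                omega
            · by_cases hxc : x = c
              · subst hxc
                have := h x hxr
                rw [PySem.Dict.get?_insert_self] at this
                rw [hget]
                simp only [List.count_cons_self, Option.getD_some] at this ⊢
                push_cast at this ⊢
                omega
              · have := h x hxr
                rw [PySem.Dict.get?_insert_of_ne _ _ hxc] at this
                rwa [List.count_cons_of_ne (Ne.symm hxc)]
        · intro x
          by_cases hxc : x = c
          · subst hxc
            rw [PySem.Dict.get?_insert_self]
            simp only [Option.getD_some]
            omega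
          · rw [PySem.Dict.get?_insert_of_ne _ _ hxc]; exact hnn x

-- the multiset characterisation shared by both programs
lemma pvCounts_eq_iff (la lb : List Char) :
    (la.length = lb.length ∧ ∀ c ∈ lb, ((lb.count c : Int)) ≤ (la.count c : Int)) ↔
    (∀ c, la.count c = lb.count c) := by
  constructor
  · rintro ⟨hlen, hle⟩
    have hle' : ∀ c : Char, lb.count c ≤ la.count c := by
      intro c
      by_cases h : c ∈ lb
      · exact_mod_cast hle c h
      · simp [List.count_eq_zero_of_not_mem h]
    have hsub : (lb : Multiset Char) ≤ (la : Multiset Char) := by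
      rw [Multiset.le_iff_count]
      intro c
      simpa [Multiset.coe_count] using hle' c
    have : (lb : Multiset Char) = (la : Multiset Char) := by
      apply Multiset.eq_of_le_of_card_le hsub
      simp [Multiset.coe_card, hlen]
    intro c
    have := congrArg (Multiset.count c) this
    simpa [Multiset.coe_count] using this.symm
  · intro h
    have hm : (la : Multiset Char) = (lb : Multiset Char) := by
      ext c
      simpa [Multiset.coe_count] using h c
    constructor
    · have := congrArg Multiset.card hm
      simpa [Multiset.coe_card] using this
    · intro c _
      exact_mod_cast (h c).symm.le

lemma pvA_iff (a b : String) :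
    has_same_digit_frequency a b = true ↔ (∀ c, a.toList.count c = b.toList.count c) := by
  unfold has_same_digit_frequency
  rw [pvFoldA_eq_counter]
  by_cases hlen : a.toList.length = b.toList.length
  · simp only [hlen, ne_eq, not_true_eq_false, if_false]
    rw [pvGoB_spec _ _ (fun c => by rw [pvGet?_counter]; split <;> simp)]
    rw [← pvCounts_eq_iff]
    simp only [decide_eq_true_eq]
    constructor
    · intro h
      refine ⟨hlen, fun c hc => ?_⟩
      have hthis := h c hc
      rw [pvGet?_counter] at hthis
      by_cases hca : c ∈ a.toList
      · rwa [if_pos hca, Option.getD_some] at hthis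
      · rw [if_neg hca, Option.getD_none] at hthis
        have hb0 : b.toList.count c = 0 := by omega
        simp [hb0]
    · rintro ⟨_, h⟩ c hc
      rw [pvGet?_counter]
      by_cases hca : c ∈ a.toList
      · rw [if_pos hca, Option.getD_some]; exact h c hc
      · rw [if_neg hca, Option.getD_none]
        have := h c hc
        simp only [List.count_eq_zero_of_not_mem hca] at this
        exact this
  · simp only [ne_eq, hlen, not_false_eq_true, if_true, Bool.false_eq_true, false_iff]
    intro h
    exact hlen ((pvCounts_eq_iff _ _).mpr h).1

lemma pvB_iff (a b : String) :
    has_same_digit_frequency_alt a b = true ↔ (∀ c, a.toList.count c = b.toList.count c) := by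
  unfold has_same_digit_frequency_alt pvCounterB
  rw [PySem.Dict.foldl_insert_getD_add_one_eq_counter, PySem.Dict.foldl_insert_getD_add_one_eq_counter]
  simp only [Bool.and_eq_true, PySem.Set.equal, PySem.Set.issubset, PySem.Dict.keys_counter,
    List.all_eq_true, PySem.Set.contains, List.contains_iff_mem,
    PySem.Set.mem_ofList, beq_iff_eq]
  constructor
  · rintro ⟨⟨hst, hts⟩, hval⟩ c
    by_cases hca : c ∈ a.toList
    · have heq := hval c hca
      have hcb : c ∈ b.toList := hst c hca
      rw [pvGet?_counter, pvGet?_counter, if_pos hca, if_pos hcb] at heq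
      exact_mod_cast Option.some.inj heq
    · have hcb : c ∉ b.toList := fun hb => hca (hts c hb)
      simp [List.count_eq_zero_of_not_mem, hca, hcb]
  · intro h
    have hmem : ∀ c, c ∈ a.toList ↔ c ∈ b.toList := by
      intro c
      rw [← List.count_pos_iff, ← List.count_pos_iff, h c]
    refine ⟨⟨fun c hc => (hmem c).mp hc, fun c hc => (hmem c).mpr hc⟩, fun c hc => ?_⟩
    rw [pvGet?_counter, pvGet?_counter, if_pos hc, if_pos ((hmem c).mp hc), h c]

-- ===== VERDICT (by name: the statement is the Claim_ definition above) =====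
theorem has_same_digit_frequency_spec : Claim_equal_has_same_digit_frequency := by
  intro a b _
  unfold Spec_has_same_digit_frequency
  rw [Bool.eq_iff_iff, pvA_iff, pvB_iff]
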